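-- pv_equiv track=rewrite | github.com/berossm/yocto_common_codename | yocto_checkout_common.py | find_newest_common
-- ===== SOURCE A (Python) =====
-- def find_newest_common(distros, branch_collection):
--     remaining = distros
--     got_result = False
--     for key in branch_collection:
--         remaining = list(set(remaining) & set(branch_collection[key]))
--     best_index = 0
--     for distro in remaining:
--         if distro in distros[best_index:]:
--             result_index = distros.index(distro, best_index)
--             best_index = result_index
--             got_result = True
--     if got_result:
--         return distros[best_index]
--     else:
--         return None
-- ===== SOURCE B (Python) =====
-- def find_newest_common(distros, branch_collection):
--     common = set(distros)
--     for branches in branch_collection.values():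
--         common &= set(branches)
--     for distro in reversed(distros):
--         if distro in common:
--             return distro
--     return None
-- ===== Notes on version B (the rewrite author's own statement) =====
-- stated objective: simpler
-- what changed: A repeatedly slices distros[best_index:] and calls distros.index(...) while jumping through the remaining distros; B intersects the branch sets once and then does a single reverse scan of distros returning the first (i.e. last-indexed) common distro.
-- outside the precondition, e.g. on find_newest_common(['a', 'b', 'a'], {'k0': ['a']}): A returns 'a', B returns 'a'
import Mathlib
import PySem

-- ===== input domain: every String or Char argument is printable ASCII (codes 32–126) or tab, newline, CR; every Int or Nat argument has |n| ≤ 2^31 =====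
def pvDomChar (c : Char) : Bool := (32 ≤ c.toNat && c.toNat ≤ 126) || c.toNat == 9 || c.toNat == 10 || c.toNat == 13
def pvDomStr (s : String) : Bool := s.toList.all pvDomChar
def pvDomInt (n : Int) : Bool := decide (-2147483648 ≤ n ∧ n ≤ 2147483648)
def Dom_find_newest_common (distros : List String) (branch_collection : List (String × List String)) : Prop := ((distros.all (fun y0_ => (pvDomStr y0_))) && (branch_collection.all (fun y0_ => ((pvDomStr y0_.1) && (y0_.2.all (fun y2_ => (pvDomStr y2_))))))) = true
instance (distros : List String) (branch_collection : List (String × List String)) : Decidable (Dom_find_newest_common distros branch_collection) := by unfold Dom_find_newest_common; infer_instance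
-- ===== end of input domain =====

-- B replaces A's jump-and-slice index scan by one intersection pass plus a reverse scan returning
-- the last common distro (simpler); Pre_ excludes the hash-order-dependent duplicate case.


-- ===== PORT A =====
-- the body of A's second loop: 'if distro in distros[best_index:]: best_index = distros.index(distro, best_index); got_result = True'
-- ('distros.index(distro, best_index)' is ported by hand as best_index + first index of distro in the
--  slice distros[best_index:] — exact, since Python's list.index(x, start) returns the first absolute
--  index ≥ start and the guard ensures the occurrence exists)
def pvStepA (distros : List String) (s : Int × Bool) (distro : String) : Int × Bool :=
  if (PySem.List.slice distros (some s.1) none).contains distro then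
    (s.1 + ((PySem.List.index? (PySem.List.slice distros (some s.1) none) distro).getD 0 : Nat), true)
  else s

def find_newest_common (distros : List String) (branch_collection : List (String × List String)) : Option String :=
  let d := PySem.Dict.ofList branch_collection
  -- remaining = distros; for key in branch_collection: remaining = list(set(remaining) & set(branch_collection[key]))
  let remaining := d.keys.foldl
    (fun rem key => PySem.Set.inter (PySem.Set.ofList rem) (PySem.Set.ofList (d.getD key []))) distros
  -- best_index = 0; got_result = False; for distro in remaining: …
  let st := remaining.foldl (pvStepA distros) (0, false)
  if st.2 then PySem.List.pyGet? distros st.1 else none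

-- ===== PORT B =====
def find_newest_common_alt (distros : List String) (branch_collection : List (String × List String)) : Option String :=
  let d := PySem.Dict.ofList branch_collection
  let common := d.values.foldl
    (fun s branches => PySem.Set.inter s (PySem.Set.ofList branches)) (PySem.Set.ofList distros)
  distros.reverse.find? (fun distro => PySem.Set.contains common distro)

-- ===== PRECONDITION & SPEC =====
-- Pre_ excludes distros lists with duplicate entries when branch_collection is nonempty: there A
-- rebuilds remaining via list(set(…) & set(…)) and its returned value depends on Python's set
-- iteration (hash) order, which is unspecified and not modelled.
def Pre_find_newest_common (distros : List String) (branch_collection : List (String × List String)) : Prop :=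
  distros.Nodup ∨ branch_collection = []
instance (distros : List String) (branch_collection : List (String × List String)) : Decidable (Pre_find_newest_common distros branch_collection) := by unfold Pre_find_newest_common; infer_instance

def pvWitness_find_newest_common : List String × (List (String × List String)) :=
  (["dunfell", "kirkstone", "scarthgap"], [("repo1", ["kirkstone", "dunfell"]), ("repo2", ["dunfell", "kirkstone"])])

def Spec_find_newest_common (distros : List String) (branch_collection : List (String × List String)) (out : Option String) : Prop := out = find_newest_common_alt distros branch_collection
instance (distros : List String) (branch_collection : List (String × List String)) (out : Option String) : Decidable (Spec_find_newest_common distros branch_collection out) := by unfold Spec_find_newest_common; infer_instance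

-- ===== CLAIM (what is proved, stated in full; the proofs are below) =====
def Claim_equal_find_newest_common : Prop := ∀ (distros : List String) (branch_collection : List (String × List String)), Dom_find_newest_common distros branch_collection → Pre_find_newest_common distros branch_collection → Spec_find_newest_common distros branch_collection (find_newest_common distros branch_collection)

-- ===== LEMMAS AND PROOFS =====

-- Python's list.index(v) as an Option: first index of a member
lemma pv_idxOf?_of_mem (xs : List String) (v : String) (h : v ∈ xs) :
    List.idxOf? v xs = some (xs.idxOf v) := by
  rw [List.idxOf?, List.idxOf, List.findIdx?_eq_some_iff_findIdx_eq]
  exact ⟨by simpa [List.idxOf] using List.idxOf_lt_length_iff.mpr h, rfl⟩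

-- membership in A's intersection fold
lemma pv_mem_foldA (keys : List String) (d : PySem.Dict String (List String)) :
    ∀ (rem : List String) (y : String),
      y ∈ keys.foldl (fun rem key => PySem.Set.inter (PySem.Set.ofList rem) (PySem.Set.ofList (d.getD key []))) rem
        ↔ y ∈ rem ∧ ∀ k ∈ keys, y ∈ d.getD k [] := by
  induction keys with
  | nil => simp
  | cons k t ih =>
    intro rem y
    simp only [List.foldl_cons, ih, PySem.Set.mem_inter, PySem.Set.mem_ofList, List.mem_cons]
    constructor
    · rintro ⟨⟨h1, h2⟩, h3⟩
      exact ⟨h1, by rintro k' (rfl | hk'); exact h2; exact h3 k' hk'⟩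
    · rintro ⟨h1, h2⟩
      exact ⟨⟨h1, h2 k (Or.inl rfl)⟩, fun k' hk' => h2 k' (Or.inr hk')⟩

-- membership in B's intersection fold
lemma pv_mem_foldB (vals : List (List String)) :
    ∀ (s : PySem.Set String) (y : String),
      y ∈ vals.foldl (fun s branches => PySem.Set.inter s (PySem.Set.ofList branches)) s
        ↔ y ∈ s ∧ ∀ b ∈ vals, y ∈ b := by
  induction vals with
  | nil => simp
  | cons v t ih =>
    intro s y
    simp only [List.foldl_cons, ih, PySem.Set.mem_inter, PySem.Set.mem_ofList, List.mem_cons]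
    constructor
    · rintro ⟨⟨h1, h2⟩, h3⟩
      exact ⟨h1, by rintro b (rfl | hb); exact h2; exact h3 b hb⟩
    · rintro ⟨h1, h2⟩
      exact ⟨⟨h1, h2 v (Or.inl rfl)⟩, fun b hb => h2 b (Or.inr hb)⟩

-- the loop step on a state (↑b, g), b : Nat: jump to the first occurrence ≥ b if there is one
lemma pv_stepA_natCast (distros : List String) (b : Nat) (g : Bool) (x : String) :
    pvStepA distros ((b : Int), g) x =
      if x ∈ distros.drop b then (((b + (distros.drop b).idxOf x : Nat) : Int), true) else ((b : Int), g) := by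
  unfold pvStepA
  rw [PySem.List.slice_from distros (by positivity : (0:Int) ≤ (b:Int))]
  simp only [Int.toNat_natCast]
  by_cases h : x ∈ distros.drop b
  · simp [h, PySem.List.index?, pv_idxOf?_of_mem _ _ h]
  · simp [h]

-- under Nodup, membership in a tail is a bound on the unique index
lemma pv_mem_drop_iff (distros : List String) (hN : distros.Nodup) (b : Nat)
    (x : String) (hx : x ∈ distros) :
    x ∈ distros.drop b ↔ b ≤ distros.idxOf x := by
  constructor
  · intro h
    obtain ⟨j, hj, hjx⟩ := List.getElem_of_mem h
    rw [List.getElem_drop] at hjx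
    have : distros.idxOf x = b + j := by
      rw [← hjx]; exact hN.idxOf_getElem _ _
    omega
  · intro h
    have hlt : distros.idxOf x < distros.length := List.idxOf_lt_length_iff.mpr hx
    have hx' : distros[distros.idxOf x] = x := List.getElem_idxOf hlt
    have h2 := List.getElem?_drop (xs := distros) (i := b) (j := distros.idxOf x - b)
    rw [show b + (distros.idxOf x - b) = distros.idxOf x by omega,
        List.getElem?_eq_getElem hlt, hx'] at h2
    exact List.mem_of_getElem? h2

lemma pv_idxOf_drop (distros : List String) (hN : distros.Nodup) (b : Nat)
    (x : String) (hx : x ∈ distros.drop b) :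
    b + (distros.drop b).idxOf x = distros.idxOf x := by
  have hNd : (distros.drop b).Nodup := hN.drop
  have hlt : (distros.drop b).idxOf x < (distros.drop b).length := List.idxOf_lt_length_iff.mpr hx
  have h1 : (distros.drop b)[(distros.drop b).idxOf x] = x := List.getElem_idxOf hlt
  rw [List.getElem_drop] at h1
  have hb : b + (distros.drop b).idxOf x < distros.length := by
    rw [List.length_drop] at hlt; omega
  conv_rhs => rw [← h1]
  exact (hN.idxOf_getElem _ hb).symm

-- under Nodup, A's loop from a seen state is a running maximum of first indices
lemma pv_foldA_max (distros : List String) (hN : distros.Nodup) (r : List String)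
    (hr : ∀ x ∈ r, x ∈ distros) : ∀ (c : Nat),
    r.foldl (pvStepA distros) ((c : Int), true)
      = (((r.foldl (fun m x => max m (distros.idxOf x)) c : Nat) : Int), true) := by
  induction r with
  | nil => intro c; simp
  | cons x t ih =>
    intro c
    have hx : x ∈ distros := hr x (List.mem_cons_self ..)
    rw [List.foldl_cons, List.foldl_cons, pv_stepA_natCast]
    by_cases h : x ∈ distros.drop c
    · rw [if_pos h, pv_idxOf_drop distros hN c x h,
          show max c (distros.idxOf x) = distros.idxOf x from
            Nat.max_eq_right ((pv_mem_drop_iff distros hN c x hx).mp h)]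
      exact ih (fun y hy => hr y (List.mem_cons_of_mem _ hy)) _
    · rw [if_neg h,
          show max c (distros.idxOf x) = c from
            Nat.max_eq_left (by
              have := (pv_mem_drop_iff distros hN c x hx).not.mp h; omega)]
      exact ih (fun y hy => hr y (List.mem_cons_of_mem _ hy)) _

-- the running maximum is attained by the seed or by an element
lemma pv_foldl_max_attained (r : List String) (f : String → Nat) : ∀ (c : Nat),
    r.foldl (fun m x => max m (f x)) c = c ∨ ∃ x ∈ r, f x = r.foldl (fun m x => max m (f x)) c := by
  induction r with
  | nil => intro c; left; rfl
  | cons a t ih =>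
    intro c
    rw [List.foldl_cons]
    rcases ih (max c (f a)) with h | ⟨x, hx, hfx⟩
    · rcases Nat.le_total (f a) c with hm | hm
      · left; rw [h, Nat.max_eq_left hm]
      · right; exact ⟨a, List.mem_cons_self .., by rw [h, Nat.max_eq_right hm]⟩
    · right; exact ⟨x, List.mem_cons_of_mem _ hx, hfx⟩

lemma pv_foldl_max_ge (r : List String) (f : String → Nat) : ∀ (c : Nat),
    c ≤ r.foldl (fun m x => max m (f x)) c ∧ ∀ x ∈ r, f x ≤ r.foldl (fun m x => max m (f x)) c := by
  induction r with
  | nil => intro c; exact ⟨Nat.le_refl _, by simp⟩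
  | cons a t ih =>
    intro c
    rw [List.foldl_cons]
    obtain ⟨h1, h2⟩ := ih (max c (f a))
    refine ⟨Nat.le_trans (Nat.le_max_left _ _) h1, ?_⟩
    intro x hx
    rcases List.mem_cons.mp hx with rfl | hx'
    · exact Nat.le_trans (Nat.le_max_right _ _) h1
    · exact h2 x hx'

-- find? on the reverse returns the element at the greatest index satisfying the predicate
lemma pv_find?_reverse (l : List String) (p : String → Bool) (M : Nat) (hM : M < l.length)
    (hp : p l[M] = true) (hgt : ∀ j (hj : j < l.length), M < j → p l[j] = false) :
    l.reverse.find? p = some l[M] := by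
  induction l using List.reverseRecOn generalizing M with
  | nil => simp at hM
  | append_singleton ys a ih =>
    have hlen : (ys ++ [a]).length = ys.length + 1 := by simp
    have hlast : (ys ++ [a])[ys.length] = a := by simp
    rw [List.reverse_append, List.reverse_singleton, List.singleton_append, List.find?_cons]
    by_cases hpa : p a = true
    · have hMeq : M = ys.length := by
        by_contra hne
        have hMlt : M < ys.length := by omega
        have := hgt ys.length (by omega) hMlt
        rw [hlast] at this
        simp [hpa] at this
      subst hMeq
      rw [hlast] at hp ⊢
      simp [hpa]
    · have hMne : M ≠ ys.length := by
        intro hMeq; subst hMeq; rw [hlast] at hp; exact hpa hp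
      have hMlt : M < ys.length := by omega
      have hgety : (ys ++ [a])[M] = ys[M] := List.getElem_append_left hMlt
      rw [hgety] at hp ⊢
      rw [Bool.not_eq_true] at hpa
      simp only [hpa]
      exact ih M hMlt hp (fun j hj hMj => by
        have h5 := hgt j (by omega) hMj
        rwa [show (ys ++ [a])[j]'(by simp; omega) = ys[j] from List.getElem_append_left hj] at h5)

-- with an empty branch_collection A scans distros itself: the loop lands on an occurrence of the last element
lemma pv_foldA_self (distros : List String) :
    ∀ (t : List String) (i b : Nat) (g : Bool), distros.drop i = t → b ≤ i →
      (t = [] ∧ t.foldl (pvStepA distros) ((b : Int), g) = ((b : Int), g)) ∨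
      (t ≠ [] ∧ ∃ c : Nat, c < distros.length ∧
        t.foldl (pvStepA distros) ((b : Int), g) = ((c : Int), true) ∧
        distros[c]? = t.getLast?) := by
  intro t
  induction t with
  | nil =>
    intro i b g _ _
    exact Or.inl ⟨rfl, by simp⟩
  | cons x t' ih =>
    intro i b g hdrop hbi
    have hi : i < distros.length := by
      have hne : ¬ distros.length ≤ i := fun hle => by
        rw [List.drop_eq_nil_iff.mpr hle] at hdrop; exact List.cons_ne_nil x t' hdrop.symm
      omega
    have hxi : distros[i]? = some x := by
      have h0 := List.getElem?_drop (xs := distros) (i := i) (j := 0)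
      rw [hdrop] at h0; simpa using h0.symm
    have hxmem : x ∈ distros.drop b := by
      have h1 := List.getElem?_drop (xs := distros) (i := b) (j := i - b)
      rw [show b + (i - b) = i by omega, hxi] at h1
      exact List.mem_of_getElem? h1
    rw [List.foldl_cons, pv_stepA_natCast, if_pos hxmem]
    have hidx : (distros.drop b).idxOf x ≤ i - b := by
      have hmem2 : x ∈ (distros.drop b).take (i - b + 1) := by
        have h1 := List.getElem?_drop (xs := distros) (i := b) (j := i - b)
        rw [show b + (i - b) = i by omega, hxi] at h1
        have h2 := List.getElem?_take_of_lt (l := distros.drop b) (i := i - b)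
          (j := i - b + 1) (by omega)
        rw [h1] at h2
        exact List.mem_of_getElem? h2
      have := (List.mem_take_iff_idxOf_lt hxmem).mp hmem2
      omega
    have hc0 : b + (distros.drop b).idxOf x ≤ i := by omega
    have hc0lt : b + (distros.drop b).idxOf x < distros.length := by omega
    have hgc0 : distros[b + (distros.drop b).idxOf x]? = some x := by
      have hlt2 : (distros.drop b).idxOf x < (distros.drop b).length :=
        List.idxOf_lt_length_iff.mpr hxmem
      have hmm : (distros.drop b)[(distros.drop b).idxOf x] = x :=
        List.getElem_idxOf hlt2
      rw [List.getElem_drop] at hmm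
      rw [List.getElem?_eq_getElem hc0lt, hmm]
    cases t' with
    | nil =>
      refine Or.inr ⟨by simp, b + (distros.drop b).idxOf x, hc0lt, by simp, ?_⟩
      simpa using hgc0
    | cons y t'' =>
      have hdrop' : distros.drop (i + 1) = y :: t'' := by
        have hD : distros.drop (i + 1) = (distros.drop i).drop 1 := by
          rw [List.drop_drop]
        rw [hD, hdrop]; rfl
      rcases ih (i + 1) (b + (distros.drop b).idxOf x) true hdrop' (by omega) with
        ⟨hnil, _⟩ | ⟨_, c, hlt, hfold, hlast⟩
      · exact absurd hnil (List.cons_ne_nil y t'')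
      · refine Or.inr ⟨List.cons_ne_nil _ _, c, hlt, hfold, ?_⟩
        rw [hlast, List.getLast?_cons_cons]

-- the heart of the equivalence, stated over the unfolded ports
lemma pv_main (distros : List String) (bc : List (String × List String))
    (hpre : distros.Nodup ∨ bc = []) :
    find_newest_common distros bc = find_newest_common_alt distros bc := by
  simp only [find_newest_common, find_newest_common_alt]
  set d := PySem.Dict.ofList bc with hd
  set r := d.keys.foldl
    (fun rem key => PySem.Set.inter (PySem.Set.ofList rem) (PySem.Set.ofList (d.getD key []))) distros with hrdef
  set common := d.values.foldl
    (fun s branches => PySem.Set.inter s (PySem.Set.ofList branches)) (PySem.Set.ofList distros) with hcdef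
  have hmemr : ∀ y, y ∈ r ↔ y ∈ distros ∧ ∀ k ∈ d.keys, y ∈ d.getD k [] :=
    pv_mem_foldA d.keys d distros
  have hvals : d.values = d.keys.map (fun k => d.getD k []) :=
    PySem.Dict.values_eq_map_keys d (PySem.Dict.nodup_keys_ofList bc) []
  have hmemc : ∀ y, y ∈ common ↔ y ∈ distros ∧ ∀ k ∈ d.keys, y ∈ d.getD k [] := by
    intro y
    rw [hcdef, pv_mem_foldB d.values (PySem.Set.ofList distros) y, PySem.Set.mem_ofList, hvals]
    simp only [List.forall_mem_map]
  have hmem : ∀ y, y ∈ common ↔ y ∈ r := fun y => (hmemc y).trans (hmemr y).symm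
  rcases hpre with hN | hbc
  · -- distros has no duplicates
    have hr : ∀ x ∈ r, x ∈ distros := fun x hx => ((hmemr x).mp hx).1
    cases hrc : r with
    | nil =>
      simp only [List.foldl_nil]
      have hnone : List.find? (fun distro => common.contains distro) distros.reverse = none :=
        List.find?_eq_none.mpr (fun y _ hy => by
          rw [PySem.Set.contains_iff] at hy
          have h2 : y ∈ r := (hmem y).mp hy
          rw [hrc] at h2
          exact absurd h2 (List.not_mem_nil))
      rw [hnone]
      simp
    | cons x0 t =>
      rw [hrc] at hr
      have hx0 : x0 ∈ distros := hr x0 (List.mem_cons_self ..)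
      have ht : ∀ x ∈ t, x ∈ distros := fun x hx => hr x (List.mem_cons_of_mem _ hx)
      rw [List.foldl_cons,
          show ((0 : Int), false) = (((0 : Nat) : Int), false) by norm_num,
          pv_stepA_natCast distros 0 false x0, List.drop_zero, if_pos hx0,
          show (0 + distros.idxOf x0 : Nat) = distros.idxOf x0 from Nat.zero_add _,
          pv_foldA_max distros hN t ht (distros.idxOf x0)]
      set M := t.foldl (fun m x => max m (distros.idxOf x)) (distros.idxOf x0) with hMdef
      -- M is the first index of some element of r, hence in range and hit by r
      have hMr : ∃ y ∈ x0 :: t, distros.idxOf y = M := by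
        rcases pv_foldl_max_attained t (fun x => distros.idxOf x) (distros.idxOf x0) with h | ⟨y, hy, hfy⟩
        · exact ⟨x0, List.mem_cons_self .., h.symm⟩
        · exact ⟨y, List.mem_cons_of_mem _ hy, hfy⟩
      obtain ⟨y, hyr, hyM⟩ := hMr
      have hylt : distros.idxOf y < distros.length :=
        List.idxOf_lt_length_iff.mpr (hr y hyr)
      have hMlt : M < distros.length := hyM ▸ hylt
      have hgM : distros[M] = y := by
        have h6 := List.getElem_idxOf hylt
        simp only [hyM] at h6
        exact h6
      have hub : ∀ z ∈ x0 :: t, distros.idxOf z ≤ M := by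
        obtain ⟨h1, h2⟩ := pv_foldl_max_ge t (fun x => distros.idxOf x) (distros.idxOf x0)
        intro z hz
        rcases List.mem_cons.mp hz with rfl | hz'
        · exact h1
        · exact h2 z hz'
      rw [pv_find?_reverse distros _ M hMlt
            (by rw [hgM, PySem.Set.contains_iff]; exact (hmem y).mpr (hrc.symm ▸ hyr))
            (fun j hj hMj => by
              rw [Bool.eq_false_iff]
              intro hcon
              rw [PySem.Set.contains_iff] at hcon
              have hjr : distros[j] ∈ x0 :: t := hrc ▸ (hmem distros[j]).mp hcon
              have := hub distros[j] hjr
              rw [hN.idxOf_getElem _ hj] at this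
              omega)]
      rw [if_pos (rfl :
        ((((M : Nat) : Int), true) : Int × Bool).2 = true)]
      show PySem.List.pyGet? distros ((M : Nat) : Int) = _
      rw [PySem.List.pyGet?_natCast, List.getElem?_eq_getElem hMlt]
  · -- branch_collection is empty: remaining is distros itself
    subst hbc
    have hkeys : d.keys = [] := rfl
    have hr0 : r = distros := by rw [hrdef, hkeys, List.foldl_nil]
    have hvals0 : d.values = [] := rfl
    have hc0 : common = PySem.Set.ofList distros := by rw [hcdef, hvals0, List.foldl_nil]
    rw [hr0, hc0]
    rcases pv_foldA_self distros distros 0 0 false List.drop_zero (Nat.le_refl 0) with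
      ⟨hnil, _⟩ | ⟨hne, c, hlt, hfold, hlast⟩
    · subst hnil; simp
    · rw [show ((0 : Int), false) = (((0 : Nat) : Int), false) by norm_num, hfold,
          if_pos (rfl : ((((c : Nat) : Int), true) : Int × Bool).2 = true)]
      show PySem.List.pyGet? distros ((c : Nat) : Int) = _
      rw [PySem.List.pyGet?_natCast, hlast]
      have hrev : distros.reverse ≠ [] := by
        simpa using hne
      obtain ⟨z, zs, hzz⟩ := List.exists_cons_of_ne_nil hrev
      rw [hzz, List.find?_cons,
          show PySem.Set.contains (PySem.Set.ofList distros) z = true by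
            rw [PySem.Set.contains_iff, PySem.Set.mem_ofList]
            have : z ∈ distros.reverse := by rw [hzz]; exact List.mem_cons_self ..
            exact List.mem_reverse.mp this]
      have : distros.getLast? = some z := by
        rw [← List.head?_reverse, hzz]; rfl
      rw [this]

-- ===== VERDICT (by name: the statement is the Claim_ definition above) =====
theorem find_newest_common_spec : Claim_equal_find_newest_common := by
  intro distros bc _hdom hpre
  unfold Spec_find_newest_common
  exact pv_main distros bc hpre
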